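-- pv_equiv track=rewrite | github.com/masotiofficial/quera-problemset-python | P0175884/calculator.py | calculate_floor
-- ===== SOURCE A (Python) =====
-- def calculate_floor(string):
--     floor = 0
--
--     for char in string[:4]:
--         if char == 'U':
--             floor += 1
--         else:
--             floor -= 1
--
--     return floor
-- ===== SOURCE B (Python) =====
-- def calculate_floor(string):
--     s = string[:4]
--     return 2 * s.count('U') - len(s)
-- ===== Notes on version B (the rewrite author's own statement) =====
-- stated objective: simpler
-- what changed: Replaces the per-character accumulation loop with a closed-form formula: twice the up-move count minus the length of the 4-char slice.
import Mathlib
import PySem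

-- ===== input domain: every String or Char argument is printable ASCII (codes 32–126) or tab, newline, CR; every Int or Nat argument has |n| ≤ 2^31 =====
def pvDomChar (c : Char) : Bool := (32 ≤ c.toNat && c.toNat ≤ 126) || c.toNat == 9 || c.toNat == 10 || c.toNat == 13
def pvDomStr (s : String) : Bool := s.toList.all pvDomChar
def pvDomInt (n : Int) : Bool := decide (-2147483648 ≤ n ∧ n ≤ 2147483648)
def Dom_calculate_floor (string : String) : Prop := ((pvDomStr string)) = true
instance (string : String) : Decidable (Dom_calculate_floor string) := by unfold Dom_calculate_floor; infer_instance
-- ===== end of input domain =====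

-- ===== PORT A =====
-- B: closed form 2*count('U') - len over the first-4 slice, instead of A's accumulation loop.
def calculate_floor (string : String) : Int :=
  (PySem.List.slice string.toList none (some 4)).foldl
    (fun floor char => if char = 'U' then floor + 1 else floor - 1) 0

-- ===== PORT B =====
def calculate_floor_alt (string : String) : Int :=
  let s := PySem.List.slice string.toList none (some 4)
  2 * (s.count 'U' : Int) - (s.length : Int)

-- ===== PRECONDITION & SPEC =====
def Spec_calculate_floor (string : String) (out : Int) : Prop := out = calculate_floor_alt string
instance (string : String) (out : Int) : Decidable (Spec_calculate_floor string out) := by unfold Spec_calculate_floor; infer_instance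

-- ===== CLAIM (what is proved, stated in full; the proofs are below) =====
def Claim_equal_calculate_floor : Prop := ∀ (string : String), Dom_calculate_floor string → Spec_calculate_floor string (calculate_floor string)

-- ===== LEMMAS AND PROOFS =====

-- ===== VERDICT (by name: the statement is the Claim_ definition above) =====
theorem pv_fold_eq (l : List Char) (a : Int) :
    l.foldl (fun floor char => if char = 'U' then floor + 1 else floor - 1) a
      = a + 2 * (l.count 'U' : Int) - (l.length : Int) := by
  induction l generalizing a with
  | nil => simp
  | cons c l ih =>
    simp only [List.foldl_cons, List.count_cons, List.length_cons, ih]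
    by_cases h : c = 'U' <;> simp [h] <;> ring

theorem calculate_floor_spec : Claim_equal_calculate_floor := by
  intro s _
  unfold Spec_calculate_floor calculate_floor calculate_floor_alt
  simp [pv_fold_eq]
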